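-- pv_equiv track=rewrite | github.com/skanderkaroui/Coding-Problems-Practice | B_Defeating_the_Monsters_Alice_s_Strength_Challenge.py | defeat
-- ===== SOURCE A (Python) =====
-- def defeat(s, n, monsters):
--     monsters.sort()
--
--     for x, y in monsters:
--         if s > x:
--             s += y
--         else:
--             return "NO"
--     return "YES"
-- ===== SOURCE B (Python) =====
-- def defeat(s, n, monsters):
--     monsters.sort()
--     prefix = [s]
--     for _, y in monsters:
--         prefix.append(prefix[-1] + y)
--     return "YES" if all(st > x for st, (x, _) in zip(prefix, monsters)) else "NO"
-- ===== Notes on version B (the rewrite author's own statement) =====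
-- stated objective: alternative
-- what changed: Replaces A's single accumulating loop with early return by a precomputed prefix-strength table plus one all()-pass over zip(prefix, monsters).
import Mathlib
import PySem

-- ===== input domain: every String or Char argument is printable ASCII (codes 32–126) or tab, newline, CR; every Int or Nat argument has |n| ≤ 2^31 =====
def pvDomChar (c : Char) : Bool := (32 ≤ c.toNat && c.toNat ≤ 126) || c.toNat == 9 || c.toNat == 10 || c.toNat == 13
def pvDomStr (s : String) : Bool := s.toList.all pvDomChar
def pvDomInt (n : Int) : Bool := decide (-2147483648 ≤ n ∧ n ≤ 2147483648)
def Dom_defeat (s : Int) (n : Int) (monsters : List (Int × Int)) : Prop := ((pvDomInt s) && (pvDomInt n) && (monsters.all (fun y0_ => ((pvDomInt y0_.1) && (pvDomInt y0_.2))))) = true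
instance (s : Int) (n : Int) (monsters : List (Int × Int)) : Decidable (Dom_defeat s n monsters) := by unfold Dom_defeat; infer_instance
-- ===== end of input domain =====

-- B replaces A's accumulating loop + early return by a prefix-strength table and one all()-pass (alternative decomposition, same cost). A sorts `monsters` in place; the mutation is preserved by B and the equivalence is about the return value.
-- ===== PORT A =====
def defeatLoopA (s : Int) : List (Int × Int) → String
  | [] => "YES"
  | (x, y) :: rest => if s > x then defeatLoopA (s + y) rest else "NO"

def defeat (s : Int) (_n : Int) (monsters : List (Int × Int)) : String :=
  defeatLoopA s (PySem.List.sorted2 monsters (fun p => p.1) (fun p => p.2))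

-- ===== PORT B =====
def defeat_alt (s : Int) (_n : Int) (monsters : List (Int × Int)) : String :=
  let ms := PySem.List.sorted2 monsters (fun p => p.1) (fun p => p.2)
  let pref := ms.foldl (fun acc (p : Int × Int) => acc ++ [acc.getLast! + p.2]) [s]
  if (pref.zip ms).all (fun q => decide (q.1 > q.2.1)) then "YES" else "NO"

-- ===== PRECONDITION & SPEC =====
def Spec_defeat (s : Int) (n : Int) (monsters : List (Int × Int)) (out : String) : Prop := out = defeat_alt s n monsters
instance (s : Int) (n : Int) (monsters : List (Int × Int)) (out : String) : Decidable (Spec_defeat s n monsters out) := by unfold Spec_defeat; infer_instance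

-- ===== CLAIM (what is proved, stated in full; the proofs are below) =====
def Claim_equal_defeat : Prop := ∀ (s : Int) (n : Int) (monsters : List (Int × Int)), Dom_defeat s n monsters → Spec_defeat s n monsters (defeat s n monsters)

-- ===== LEMMAS AND PROOFS =====



-- tailPrefs t ms = the prefix strengths after each monster, starting from strength t
def tailPrefs (t : Int) : List (Int × Int) → List Int
  | [] => []
  | (_, y) :: rest => (t + y) :: tailPrefs (t + y) rest

lemma getLast!_concat (acc : List Int) (a : Int) : (acc ++ [a]).getLast! = a := by
  cases acc with
  | nil => rfl
  | cons b bs => simp [List.getLast!]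

lemma foldl_pref (ms : List (Int × Int)) (acc : List Int) :
    ms.foldl (fun a (p : Int × Int) => a ++ [a.getLast! + p.2]) acc
      = acc ++ tailPrefs acc.getLast! ms := by
  induction ms generalizing acc with
  | nil => simp [tailPrefs]
  | cons p rest ih =>
    obtain ⟨x, y⟩ := p
    simp only [List.foldl_cons, tailPrefs]
    rw [ih, getLast!_concat]
    simp

lemma loop_eq_all (ms : List (Int × Int)) (s : Int) :
    defeatLoopA s ms
      = (if ((s :: tailPrefs s ms).zip ms).all (fun q => decide (q.1 > q.2.1)) then "YES" else "NO") := by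
  induction ms generalizing s with
  | nil => simp [defeatLoopA]
  | cons p rest ih =>
    obtain ⟨x, y⟩ := p
    by_cases h : s > x
    · simp only [defeatLoopA, tailPrefs, List.zip_cons_cons, List.all_cons]
      rw [if_pos h, ih]
      simp only [h, decide_true, Bool.true_and]
    · simp only [defeatLoopA, tailPrefs, List.zip_cons_cons, List.all_cons]
      simp [h]

-- ===== VERDICT (by name: the statement is the Claim_ definition above) =====
theorem defeat_spec : Claim_equal_defeat := by
  intro s n monsters _
  show defeat s n monsters = defeat_alt s n monsters
  unfold defeat defeat_alt
  dsimp only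
  rw [loop_eq_all, foldl_pref]
  rfl
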